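-- pv_equiv track=rewrite | github.com/ergocoder/OIBSIP_python_taskno3 | password_generator_gui.py | violates_repeats
-- ===== SOURCE A (Python) =====
-- def violates_repeats(pw, max_repeat=2):
--     if max_repeat < 1:
--         return False
--     run = 1
--     for i in range(1, len(pw)):
--         if pw[i] == pw[i-1]:
--             run += 1
--             if run > max_repeat:
--                 return True
--         else:
--             run = 1
--     return False
-- ===== SOURCE B (Python) =====
-- def violates_repeats(pw, max_repeat=2):
--     if max_repeat < 1:
--         return False
--     k = max_repeat + 1
--     if k > len(pw):
--         return False
--     return any(c * k in pw for c in set(pw))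
-- ===== Notes on version B (the rewrite author's own statement) =====
-- stated objective: alternative
-- what changed: B reformulates the question as pattern containment: a run longer than max_repeat exists iff the string c*(max_repeat+1) is a substring for some distinct character c, so B tests substring membership per distinct character instead of A's single scan with an incremental run counter.
import Mathlib
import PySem

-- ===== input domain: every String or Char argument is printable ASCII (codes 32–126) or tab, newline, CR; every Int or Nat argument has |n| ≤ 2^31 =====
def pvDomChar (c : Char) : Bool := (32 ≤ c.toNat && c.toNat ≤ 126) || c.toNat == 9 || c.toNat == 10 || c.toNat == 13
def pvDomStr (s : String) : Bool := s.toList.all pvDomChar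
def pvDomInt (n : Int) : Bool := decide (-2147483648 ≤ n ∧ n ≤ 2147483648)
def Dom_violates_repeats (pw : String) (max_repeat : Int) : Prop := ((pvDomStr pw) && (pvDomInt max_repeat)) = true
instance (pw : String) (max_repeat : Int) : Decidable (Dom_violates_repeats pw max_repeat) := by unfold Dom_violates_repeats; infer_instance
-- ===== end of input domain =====

-- B recasts run detection as substring containment: some distinct character c with c*(max_repeat+1) a substring of pw; alternative algorithm, same result.


-- ===== PORT A =====
-- the for-loop over range(1, len(pw)): prev = pw[i-1], run = current run length
def vrLoopA (m : Int) (prev : Char) (run : Int) : List Char → Bool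
  | [] => false
  | c :: cs =>
    if c == prev then
      let run' := run + 1
      if run' > m then true else vrLoopA m c run' cs
    else vrLoopA m c 1 cs

def violates_repeats (pw : String) (max_repeat : Int) : Bool :=
  if max_repeat < 1 then false
  else
    match pw.toList with
    | [] => false
    | c :: cs => vrLoopA max_repeat c 1 cs

-- ===== PORT B =====
-- 'c * k in pw' over the distinct characters set(pw)
def violates_repeats_alt (pw : String) (max_repeat : Int) : Bool :=
  if max_repeat < 1 then false
  else
    let k := max_repeat + 1
    if k > PySem.Str.len pw then false
    else (PySem.Set.ofList pw.toList).any
           (fun c => PySem.Chars.isIn (PySem.List.pyRepeat [c] k) pw.toList)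

-- ===== PRECONDITION & SPEC =====
def Spec_violates_repeats (pw : String) (max_repeat : Int) (out : Bool) : Prop := out = violates_repeats_alt pw max_repeat
instance (pw : String) (max_repeat : Int) (out : Bool) : Decidable (Spec_violates_repeats pw max_repeat out) := by unfold Spec_violates_repeats; infer_instance

-- ===== CLAIM (what is proved, stated in full; the proofs are below) =====
def Claim_equal_violates_repeats : Prop := ∀ (pw : String) (max_repeat : Int), Dom_violates_repeats pw max_repeat → Spec_violates_repeats pw max_repeat (violates_repeats pw max_repeat)

-- ===== LEMMAS AND PROOFS =====

-- a block of K equal chars cannot be a prefix of (r < K copies of p) followed by a different char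
lemma vr_not_prefix (K : Nat) (p d : Char) (hpd : p ≠ d) :
    ∀ (r : Nat) (ds : List Char), r < K →
      ¬ (List.replicate K p <+: List.replicate r p ++ d :: ds) := by
  intro r
  induction r generalizing K with
  | zero =>
    intro ds hK h
    cases K with
    | zero => omega
    | succ K' =>
      simp only [List.replicate_zero, List.nil_append, List.replicate_succ] at h
      exact hpd (List.cons_prefix_cons.mp h).1
  | succ r ih =>
    intro ds hK h
    cases K with
    | zero => omega
    | succ K' =>
      rw [List.replicate_succ, List.replicate_succ, List.cons_append] at h
      exact ih K' ds (by omega) (List.cons_prefix_cons.mp h).2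

-- crossing a character break: a K-run infix of (r < K copies of p) ++ d :: ds lies in d :: ds
lemma vr_infix_break (K : Nat) (p d : Char) (hpd : p ≠ d) :
    ∀ (r : Nat) (ds : List Char) (e : Char), 1 ≤ K → r < K →
      (List.replicate K e <:+: List.replicate r p ++ d :: ds ↔
       List.replicate K e <:+: d :: ds) := by
  intro r
  induction r with
  | zero => intro ds e _ _; simp
  | succ r ih =>
    intro ds e hK hr
    constructor
    · intro h
      rw [List.replicate_succ, List.cons_append, List.infix_cons_iff] at h
      rcases h with h | h
      · exfalso
        -- prefix case forces e = p, then vr_not_prefix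
        have he : e = p := by
          cases K with
          | zero => omega
          | succ K' =>
            rw [List.replicate_succ] at h
            exact (List.cons_prefix_cons.mp h).1
        subst he
        rw [← List.cons_append, ← List.replicate_succ] at h
        exact vr_not_prefix K e d hpd (r + 1) ds hr h
      · exact (ih ds e hK (by omega)).mp h
    · intro h
      exact h.trans (List.suffix_append _ _).isInfix

-- an element of a nonempty constant run infix of l is in l
lemma vr_mem_of_infix (K : Nat) (e : Char) (l : List Char) (hK : 1 ≤ K)
    (h : List.replicate K e <:+: l) : e ∈ l :=
  h.subset (List.mem_replicate.mpr ⟨by omega, rfl⟩)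

-- main invariant: A's early-exit scan answers "some (m+1)-run is an infix of the string seen so far"
lemma vr_loop_iff (m : Int) (hm : 1 ≤ m) :
    ∀ (cs : List Char) (prev : Char) (run : Nat), 1 ≤ run → (run : Int) ≤ m →
      (vrLoopA m prev (run : Int) cs = true ↔
       ∃ e, List.replicate (m + 1).toNat e <:+: List.replicate run prev ++ cs) := by
  intro cs
  induction cs with
  | nil =>
    intro prev run h1 h2
    simp only [vrLoopA, List.append_nil]
    constructor
    · intro h; cases h
    · rintro ⟨e, h⟩
      have := h.length_le
      simp only [List.length_replicate] at this
      omega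
  | cons d ds ih =>
    intro prev run h1 h2
    by_cases hd : d = prev
    · subst hd
      have hrw : List.replicate run d ++ d :: ds = List.replicate (run + 1) d ++ ds := by
        rw [List.replicate_succ', List.append_assoc]; rfl
      simp only [vrLoopA, beq_self_eq_true, if_true]
      by_cases hgt : (run : Int) + 1 > m
      · have hrun : (run : Int) = m := by omega
        have hK : (m + 1).toNat = run + 1 := by omega
        rw [if_pos hgt]
        constructor
        · intro _
          exact ⟨d, hrw ▸ hK ▸ (List.prefix_append _ _).isInfix⟩
        · intro _; rfl
      · rw [if_neg hgt]
        have := ih d (run + 1) (by omega) (by push_cast; omega)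
        rw [show ((run : Int) + 1) = ((run + 1 : Nat) : Int) by push_cast; ring] at *
        rw [this, hrw]
    · have hbeq : (d == prev) = false := by simp [hd]
      simp only [vrLoopA, hbeq]
      rw [if_neg (by simp)]
      have hKpos : 1 ≤ (m + 1).toNat := by omega
      have hrK : run < (m + 1).toNat := by omega
      have ihh := ih d 1 (le_refl 1) (by push_cast; omega)
      norm_num at ihh
      rw [ihh]
      constructor
      · rintro ⟨e, h⟩
        exact ⟨e, (vr_infix_break _ prev d (fun hpd => hd hpd.symm) run ds e hKpos hrK).mpr
          (by simpa using h)⟩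
      · rintro ⟨e, h⟩
        exact ⟨e, by simpa using
          (vr_infix_break _ prev d (fun hpd => hd hpd.symm) run ds e hKpos hrK).mp h⟩

-- A = "some (m+1)-run is an infix of pw" when 1 ≤ m
lemma vr_A_iff (pw : String) (m : Int) (hm : 1 ≤ m) :
    (violates_repeats pw m = true ↔
     ∃ e, List.replicate (m + 1).toNat e <:+: pw.toList) := by
  unfold violates_repeats
  rw [if_neg (by omega)]
  cases h : pw.toList with
  | nil =>
    constructor
    · intro h; cases h
    · rintro ⟨e, hh⟩
      have := hh.length_le
      simp only [List.length_replicate, List.length_nil] at this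
      omega
  | cons c cs =>
    have := vr_loop_iff m hm cs c 1 (by omega) (by push_cast; omega)
    simpa using this

-- ===== VERDICT (by name: the statement is the Claim_ definition above) =====
theorem violates_repeats_spec : Claim_equal_violates_repeats := by
  intro pw m _
  unfold Spec_violates_repeats
  by_cases hm : m < 1
  · unfold violates_repeats violates_repeats_alt
    rw [if_pos hm, if_pos hm]
  · have hm' : 1 ≤ m := by omega
    rw [Bool.eq_iff_iff, vr_A_iff pw m hm']
    unfold violates_repeats_alt
    rw [if_neg hm]
    simp only []
    by_cases hlen : m + 1 > PySem.Str.len pw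
    · rw [if_pos hlen]
      have hlen' : (m + 1).toNat > pw.toList.length := by
        have : PySem.Str.len pw = (pw.toList.length : Int) := by
          simp [PySem.Str.len_eq]
        omega
      constructor
      · rintro ⟨e, h⟩
        have := h.length_le
        simp only [List.length_replicate] at this
        omega
      · intro h; cases h
    · rw [if_neg hlen]
      rw [List.any_eq_true]
      constructor
      · rintro ⟨e, h⟩
        refine ⟨e, ?_, ?_⟩
        · exact (PySem.Set.mem_ofList _ _).mpr (vr_mem_of_infix _ e _ (by omega) h)
        · rw [PySem.List.pyRepeat_singleton, PySem.Chars.isIn_iff_infix]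
          exact h
      · rintro ⟨e, _, h⟩
        rw [PySem.List.pyRepeat_singleton, PySem.Chars.isIn_iff_infix] at h
        exact ⟨e, h⟩
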